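-- pv_equiv track=rewrite | github.com/tomascarvalho7/thesis-deliverable | NEREL-BIO_NER_augmentations/augment_parquet_nlpaug_backtranslation.py | mask_entities
-- ===== SOURCE A (Python) =====
-- def mask_entities(text, span_rows):
--     masked_text = text
--     entity_map = {}
--     offset = 0
--
--     for i, row in enumerate(span_rows):
--         ent_text = row['text']
--         placeholder = f"ENT{i}"
--
--         start = masked_text.find(ent_text, offset)
--         if start == -1:
--             continue
--         end = start + len(ent_text)
--
--         masked_text = masked_text[:start] + placeholder + masked_text[end:]
--         entity_map[placeholder] = (ent_text, start)
--         offset = start + len(placeholder)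
--
--     return masked_text, entity_map
-- ===== SOURCE B (Python) =====
-- def mask_entities(text, span_rows):
--     # phase 1: locate each entity in the ORIGINAL text, left to right
--     matches = []
--     pos = 0
--     for i, row in enumerate(span_rows):
--         ent = row['text']
--         s = text.find(ent, pos)
--         if s != -1:
--             matches.append((i, ent, s))
--             pos = s + len(ent)
--     # phase 2: assemble the masked string from pieces, one join at the end
--     pieces = []
--     prev = 0
--     for i, ent, s in matches:
--         pieces.append(text[prev:s])
--         pieces.append(f"ENT{i}")
--         prev = s + len(ent)
--     pieces.append(text[prev:])
--     # phase 3: entity map, converting original starts to masked-string starts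
--     entity_map = {}
--     delta = 0
--     for i, ent, s in matches:
--         ph = f"ENT{i}"
--         entity_map[ph] = (ent, s + delta)
--         delta += len(ph) - len(ent)
--     return ''.join(pieces), entity_map
-- ===== Notes on version B (the rewrite author's own statement) =====
-- stated objective: alternative
-- what changed: B is staged into three independent passes over an immutable text: first compute the match list (index, entity, original start), then assemble the masked string from pieces with a single join, then build the entity map by translating original starts with a running length delta; A instead interleaves everything while repeatedly rebuilding and re-searching the mutated string.
import Mathlib
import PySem

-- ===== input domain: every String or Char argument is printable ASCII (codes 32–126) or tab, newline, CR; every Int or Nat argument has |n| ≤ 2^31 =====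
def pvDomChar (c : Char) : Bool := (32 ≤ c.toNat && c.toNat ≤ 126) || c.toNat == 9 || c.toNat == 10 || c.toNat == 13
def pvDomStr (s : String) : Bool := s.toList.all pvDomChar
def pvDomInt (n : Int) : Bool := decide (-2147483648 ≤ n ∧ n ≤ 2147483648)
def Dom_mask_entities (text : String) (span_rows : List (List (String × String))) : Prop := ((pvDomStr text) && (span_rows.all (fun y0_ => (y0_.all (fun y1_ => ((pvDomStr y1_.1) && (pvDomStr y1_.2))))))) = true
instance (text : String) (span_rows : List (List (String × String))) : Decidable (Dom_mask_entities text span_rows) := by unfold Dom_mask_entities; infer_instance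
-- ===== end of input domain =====

-- B replaces A's interleaved rebuild-and-research of the mutated string by three staged
-- passes over the immutable original text (matches, then pieces+join, then map); objective: alternative.

-- ===== PORT A =====
-- A's loop: state (masked_text, entity_map, offset); none = KeyError on row['text'].
def maskA (rows : List (Int × List (String × String))) (masked : List Char)
    (em : PySem.Dict String (String × Int)) (off : Int) :
    Option (List Char × PySem.Dict String (String × Int)) :=
  match rows with
  | [] => some (masked, em)
  | (i, row) :: rest =>
    match (PySem.Dict.mk row).get? "text" with
    | none => none
    | some ent =>
      let ph := "ENT" ++ PySem.Int.toStr i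
      let start := PySem.Chars.findFrom masked ent.toList off none
      if start = -1 then maskA rest masked em off
      else
        maskA rest
          (PySem.List.slice masked none (some start) ++ ph.toList ++
            PySem.List.slice masked (some (start + (ent.toList.length : Int))) none)
          (em.insert ph (ent, start))
          (start + (ph.toList.length : Int))

def mask_entities (text : String) (span_rows : List (List (String × String))) :
    String × (List (String × String × Int)) :=
  match maskA (PySem.List.enumerate span_rows 0) text.toList PySem.Dict.empty 0 with
  | some (m, em) => (String.ofList m, em.items)
  | none => ("", [])  -- unreachable under Pre_ (Python raises KeyError there)

-- ===== PORT B =====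
-- Phase 1: the match list (index, entity text, original start); none = KeyError.
def findMatches (text : List Char) (rows : List (Int × List (String × String)))
    (pos : Int) : Option (List (Int × String × Int)) :=
  match rows with
  | [] => some []
  | (i, row) :: rest =>
    match (PySem.Dict.mk row).get? "text" with
    | none => none
    | some ent =>
      let s := PySem.Chars.findFrom text ent.toList pos none
      if s = -1 then findMatches text rest pos
      else ((i, ent, s) :: ·) <$> findMatches text rest (s + (ent.toList.length : Int))

-- Phase 2 step: pieces.append(text[prev:s]); pieces.append(f"ENT{i}"); prev = s + len(ent)
def pieceStep (text : List Char) : (List (List Char) × Int) → (Int × String × Int) →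
    (List (List Char) × Int)
  | (ps, prev), (i, ent, s) =>
    (ps ++ [PySem.List.slice text (some prev) (some s), ("ENT" ++ PySem.Int.toStr i).toList],
     s + (ent.toList.length : Int))

-- Phase 3 step: entity_map[ph] = (ent, s + delta); delta += len(ph) - len(ent)
def mapStep : (PySem.Dict String (String × Int) × Int) → (Int × String × Int) →
    (PySem.Dict String (String × Int) × Int)
  | (em, delta), (i, ent, s) =>
    let ph := "ENT" ++ PySem.Int.toStr i
    (em.insert ph (ent, s + delta), delta + (ph.toList.length : Int) - (ent.toList.length : Int))

def mask_entities_alt (text : String) (span_rows : List (List (String × String))) :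
    String × (List (String × String × Int)) :=
  match findMatches text.toList (PySem.List.enumerate span_rows 0) 0 with
  | none => ("", [])  -- unreachable under Pre_
  | some ms =>
    let pp := ms.foldl (pieceStep text.toList) ([], 0)
    let me := ms.foldl mapStep (PySem.Dict.empty, 0)
    (String.ofList (pp.1 ++ [PySem.List.slice text.toList (some pp.2) none]).flatten,
     me.1.items)

-- ===== PRECONDITION & SPEC =====
-- Pre_ excludes exactly the rows without a "text" key, on which Python A raises KeyError.
def Pre_mask_entities (text : String) (span_rows : List (List (String × String))) : Prop :=
  ∀ row ∈ span_rows, ((PySem.Dict.mk row).get? "text").isSome = true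
instance (text : String) (span_rows : List (List (String × String))) : Decidable (Pre_mask_entities text span_rows) := by unfold Pre_mask_entities; infer_instance

def pvWitness_mask_entities : String × (List (List (String × String))) :=
  ("the cat sat", [[("text", "cat")], [("text", "sat")]])

def Spec_mask_entities (text : String) (span_rows : List (List (String × String))) (out : String × (List (String × String × Int))) : Prop := out = mask_entities_alt text span_rows
instance (text : String) (span_rows : List (List (String × String))) (out : String × (List (String × String × Int))) : Decidable (Spec_mask_entities text span_rows out) := by unfold Spec_mask_entities; infer_instance

-- ===== CLAIM =====
def Claim_equal_mask_entities : Prop := ∀ (text : String) (span_rows : List (List (String × String))), Dom_mask_entities text span_rows → Pre_mask_entities text span_rows → Spec_mask_entities text span_rows (mask_entities text span_rows)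

-- ===== LEMMAS AND PROOFS =====

-- Invariant: A's masked string is B's accumulated pieces followed by the unprocessed tail of
-- the original text, A's offset is the length of those pieces (= prev_end + delta), and A's
-- remaining work equals B's three phases run over the remaining match list.
theorem maskA_eq_phases (text : List Char) (rows : List (Int × List (String × String))) :
    ∀ (S : List (List Char)) (pe : Nat) (em : PySem.Dict String (String × Int)) (delta : Int),
      pe ≤ text.length → (pe : Int) + delta = (S.flatten.length : Int) →
      maskA rows (S.flatten ++ text.drop pe) em (S.flatten.length : Int)
        = (findMatches text rows (pe : Int)).map
            (fun ms =>
              (((ms.foldl (pieceStep text) (S, (pe : Int))).1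
                  ++ [PySem.List.slice text (some (ms.foldl (pieceStep text) (S, (pe : Int))).2) none]).flatten,
               (ms.foldl mapStep (em, delta)).1)) := by
  induction rows with
  | nil =>
    intro S pe em delta hpe hlen
    simp [maskA, findMatches, PySem.List.slice_from_natCast]
  | cons hd rest ih =>
    obtain ⟨i, row⟩ := hd
    intro S pe em delta hpe hlen
    simp only [maskA, findMatches]
    cases hg : (PySem.Dict.mk row).get? "text" with
    | none => simp
    | some ent =>
      simp only []
      have hk : S.flatten.length ≤ (S.flatten ++ text.drop pe).length := by
        simp
      have hA := PySem.Chars.findFrom_natCast (S.flatten ++ text.drop pe) ent.toList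
        S.flatten.length hk
      rw [List.drop_left] at hA
      have hB := PySem.Chars.findFrom_natCast text ent.toList pe hpe
      by_cases hf : PySem.Chars.find (text.drop pe) ent.toList = -1
      · rw [hA, hB, if_pos hf, if_pos hf]
        exact ih S pe em delta hpe hlen
      · have hf0 : 0 ≤ PySem.Chars.find (text.drop pe) ent.toList := by
          have h1 := PySem.Chars.neg_one_le_find (text.drop pe) ent.toList
          omega
        obtain ⟨fn, hfn⟩ : ∃ fn : Nat, PySem.Chars.find (text.drop pe) ent.toList = (fn : Int) :=
          ⟨_, (Int.toNat_of_nonneg hf0).symm⟩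
        have hfl : fn ≤ text.length - pe := by
          have h1 := PySem.Chars.find_le_length (text.drop pe) ent.toList
          rw [hfn] at h1
          simp only [List.length_drop] at h1
          exact_mod_cast h1
        have hpre : ent.toList <+: (text.drop pe).drop fn := by
          have h1 := (PySem.Chars.find_spec (s := text.drop pe) (sub := ent.toList) hf0).1
          rwa [hfn, Int.toNat_natCast] at h1
        have hel : ent.toList.length ≤ text.length - pe - fn := by
          have h1 := hpre.length_le
          simp only [List.length_drop] at h1
          omega
        have htk : ((text.drop pe).take fn).length = fn := by
          simp only [List.length_take, List.length_drop]
          omega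
        rw [hA, hB, if_neg hf, if_neg hf]
        rw [if_neg (by push_cast [hfn]; omega), if_neg (by push_cast [hfn]; omega)]
        -- align A's recursive call with the induction hypothesis at the stepped B state
        have e1 : PySem.List.slice (S.flatten ++ text.drop pe) none
              (some ((S.flatten.length : Int) + PySem.Chars.find (text.drop pe) ent.toList))
              ++ ("ENT" ++ PySem.Int.toStr i).toList
              ++ PySem.List.slice (S.flatten ++ text.drop pe)
                (some ((S.flatten.length : Int) + PySem.Chars.find (text.drop pe) ent.toList
                  + (ent.toList.length : Int))) none
            = (S ++ [PySem.List.slice text (some (pe : Int))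
                  (some ((pe : Int) + PySem.Chars.find (text.drop pe) ent.toList)),
                ("ENT" ++ PySem.Int.toStr i).toList]).flatten
              ++ text.drop (pe + fn + ent.toList.length) := by
          rw [hfn]
          have c1 : (S.flatten.length : Int) + (fn : Int) = ((S.flatten.length + fn : Nat) : Int) := by
            push_cast; ring
          have c2 : (S.flatten.length : Int) + (fn : Int) + (ent.toList.length : Int)
              = ((S.flatten.length + (fn + ent.toList.length) : Nat) : Int) := by
            push_cast; ring
          have c3 : (pe : Int) + (fn : Int) = ((pe + fn : Nat) : Int) := by push_cast; ring
          rw [c2, c1, c3, PySem.List.slice_to_natCast, PySem.List.slice_natCast,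
            List.take_length_add_append, PySem.List.slice_from_natCast,
            List.drop_length_add_append, List.drop_drop]
          have c4 : pe + (fn + ent.toList.length) = pe + fn + ent.toList.length := by omega
          have c5 : pe + fn - pe = fn := by omega
          rw [c4, c5]
          simp [List.append_assoc]
        have e2 : (S.flatten.length : Int) + PySem.Chars.find (text.drop pe) ent.toList
              + (("ENT" ++ PySem.Int.toStr i).toList.length : Int)
            = (((S ++ [PySem.List.slice text (some (pe : Int))
                  (some ((pe : Int) + PySem.Chars.find (text.drop pe) ent.toList)),
                ("ENT" ++ PySem.Int.toStr i).toList]).flatten.length : Int)) := by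
          rw [hfn]
          have c3 : (pe : Int) + (fn : Int) = ((pe + fn : Nat) : Int) := by push_cast; ring
          rw [c3, PySem.List.slice_natCast]
          have c5 : pe + fn - pe = fn := by omega
          simp only [List.flatten_append, List.flatten_cons, List.flatten_nil,
            List.length_append, List.append_nil, c5, htk]
          push_cast; ring
        have e3 : (pe : Int) + PySem.Chars.find (text.drop pe) ent.toList + delta
            = (S.flatten.length : Int) + PySem.Chars.find (text.drop pe) ent.toList := by
          omega
        have e4 : (pe : Int) + PySem.Chars.find (text.drop pe) ent.toList
              + (ent.toList.length : Int)
            = ((pe + fn + ent.toList.length : Nat) : Int) := by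
          rw [hfn]; push_cast; ring
        rw [e1, e2]
        have ih' := ih (S ++ [PySem.List.slice text (some (pe : Int))
              (some ((pe : Int) + PySem.Chars.find (text.drop pe) ent.toList)),
            ("ENT" ++ PySem.Int.toStr i).toList])
          (pe + fn + ent.toList.length)
          (em.insert ("ENT" ++ PySem.Int.toStr i)
            (ent, (S.flatten.length : Int) + PySem.Chars.find (text.drop pe) ent.toList))
          (delta + (("ENT" ++ PySem.Int.toStr i).toList.length : Int) - (ent.toList.length : Int))
          (by omega)
          (by rw [← e2, hfn]; push_cast; omega)
        rw [← e4] at ih'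
        rw [ih']
        cases findMatches text rest
            ((pe : Int) + PySem.Chars.find (text.drop pe) ent.toList + (ent.toList.length : Int)) with
        | none => rfl
        | some ms =>
          simp only [Option.map, Functor.map, List.foldl_cons, pieceStep, mapStep, e3]

theorem mask_entities_spec : Claim_equal_mask_entities := by
  intro text span_rows _ _
  unfold Spec_mask_entities mask_entities mask_entities_alt
  have h := maskA_eq_phases text.toList (PySem.List.enumerate span_rows 0) [] 0
      PySem.Dict.empty 0 (by simp) (by simp)
  simp only [List.flatten_nil, List.length_nil, Nat.cast_zero, List.nil_append,
    List.drop_zero] at h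
  rw [h]
  cases hb : findMatches text.toList (PySem.List.enumerate span_rows 0) 0 with
  | none => rfl
  | some ms => simp
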